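-- pv_equiv track=rewrite | github.com/imranweb7/hacker-rank-challenge | leonardo_and_prime.py | getMaximumNumberofUniquePrimeFactors
-- ===== SOURCE A (Python) =====
-- import math;
--
-- primes_count = [2, 6, 30, 210, 2310, 30030, 510510, 9699690, 223092870, 6469693230, 200560490130, 7420738134810, 304250263527210, 13082761331670030, 614889782588491410, 32589158477190044730, 1922760350154212639070];
--
-- def getMaximumNumberofUniquePrimeFactors(n, start, end):
--
-- 	if(primes_count[start] == n):
-- 		return start+1;
--
-- 	if(primes_count[end] == n):
-- 		return end+1;
--
-- 	if(n > primes_count[start] and n < primes_count[end]):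
-- 		if(end - start == 1):
-- 			return start+1;
--
-- 		left = getMaximumNumberofUniquePrimeFactors(n, start, math.ceil((start+end) / 2));
--
-- 		if(left):
-- 			return left;
-- 		else:
-- 			return getMaximumNumberofUniquePrimeFactors(n, math.ceil((start+end) / 2), end);
-- 	else:
-- 		return 0;
-- ===== SOURCE B (Python) =====
-- primes_count = [2, 6, 30, 210, 2310, 30030, 510510, 9699690, 223092870, 6469693230, 200560490130, 7420738134810, 304250263527210, 13082761331670030, 614889782588491410, 32589158477190044730, 1922760350154212639070]
--
-- def getMaximumNumberofUniquePrimeFactors(n, start, end):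
--     if primes_count[start] == n:
--         return start + 1
--     if primes_count[end] == n:
--         return end + 1
--     if not (primes_count[start] < n < primes_count[end]):
--         return 0
--     # n is strictly bracketed: walk to the last index whose entry is below n
--     i = start
--     while primes_count[i + 1] < n:
--         i += 1
--     if primes_count[i + 1] == n:
--         return i + 2
--     return i + 1
-- ===== Notes on version B (the rewrite author's own statement) =====
-- stated objective: simpler
-- what changed: A's recursive halving search (with a truthiness-based left/right fallback) is replaced by the two endpoint checks, one bracketing guard, and a single linear scan for the last table entry below n.
-- outside the precondition, e.g. on getMaximumNumberofUniquePrimeFactors(7, -17, 16): A returns 2, B returns -15; on getMaximumNumberofUniquePrimeFactors(100, 0, -5): A raises RecursionError, B returns 3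
import Mathlib
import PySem

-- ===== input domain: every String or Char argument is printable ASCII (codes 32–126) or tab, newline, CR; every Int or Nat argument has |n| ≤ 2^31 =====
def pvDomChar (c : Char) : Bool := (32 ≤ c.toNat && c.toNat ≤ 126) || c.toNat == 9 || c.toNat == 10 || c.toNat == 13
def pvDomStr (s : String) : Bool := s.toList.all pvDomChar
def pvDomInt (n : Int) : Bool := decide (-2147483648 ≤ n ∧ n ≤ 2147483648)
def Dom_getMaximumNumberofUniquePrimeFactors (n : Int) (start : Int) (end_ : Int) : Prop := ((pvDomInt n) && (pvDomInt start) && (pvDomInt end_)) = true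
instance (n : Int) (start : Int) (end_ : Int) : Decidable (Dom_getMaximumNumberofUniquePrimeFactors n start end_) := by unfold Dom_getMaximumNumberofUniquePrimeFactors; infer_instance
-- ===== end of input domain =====

-- B replaces A's recursive halving search by endpoint/bracket guards plus one linear scan
-- for the last table entry below n; objective: simpler (no speed claim on a 17-entry table).

-- ===== PORT A =====
def pvPrimesCount : List Int := [2, 6, 30, 210, 2310, 30030, 510510, 9699690, 223092870, 6469693230, 200560490130, 7420738134810, 304250263527210, 13082761331670030, 614889782588491410, 32589158477190044730, 1922760350154212639070]

-- primes_count[i]; an IndexError (pyGet? = none) is excluded by Pre_, the default 0 is never read there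
def pcAt (i : Int) : Int := (PySem.List.pyGet? pvPrimesCount i).getD 0

-- math.ceil((start+end)/2) is ported as (start+end+1)//2, exact for |start+end| ≤ 2^32 (inside Dom);
-- the fuel only makes the recursion total: 64 is never exhausted on Pre_ inputs
def pvGoA (n : Int) (fuel : Nat) (s e : Int) : Int :=
  match fuel with
  | 0 => 0
  | f + 1 =>
    if pcAt s = n then s + 1
    else if pcAt e = n then e + 1
    else if pcAt s < n ∧ n < pcAt e then
      if e - s = 1 then s + 1
      else
        let left := pvGoA n f s (PySem.Int.floordiv (s + e + 1) 2)
        if left ≠ 0 then left else pvGoA n f (PySem.Int.floordiv (s + e + 1) 2) e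
    else 0

def getMaximumNumberofUniquePrimeFactors (n : Int) (start : Int) (end_ : Int) : Int :=
  pvGoA n 64 start end_

-- ===== PORT B =====
-- the while loop of Source B; fuel 64 only makes it total and is never exhausted on Pre_ inputs
def pvScanB (n : Int) (fuel : Nat) (i : Int) : Int :=
  match fuel with
  | 0 => i
  | f + 1 => if pcAt (i + 1) < n then pvScanB n f (i + 1) else i

def getMaximumNumberofUniquePrimeFactors_alt (n : Int) (start : Int) (end_ : Int) : Int :=
  if pcAt start = n then start + 1
  else if pcAt end_ = n then end_ + 1
  else if ¬ (pcAt start < n ∧ n < pcAt end_) then 0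
  else
    let i := pvScanB n 64 start
    if pcAt (i + 1) = n then i + 2 else i + 1

-- ===== PRECONDITION & SPEC =====
-- Pre_ excludes out-of-range indices, where A raises IndexError, and the mixed-sign index
-- pairs that actually enter the halving recursion (n strictly bracketed, neither endpoint an
-- exact hit): there Python's negative-index wraparound makes the two searches walk two
-- different wrapped views of the table, and A returns accidental values or recurses forever;
-- on a same-sign pair the wraparound is one consistent shift and the programs agree.
def Pre_getMaximumNumberofUniquePrimeFactors (n : Int) (start : Int) (end_ : Int) : Prop :=
  -17 ≤ start ∧ start ≤ 16 ∧ -17 ≤ end_ ∧ end_ ≤ 16 ∧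
  (((0 ≤ start ∧ 0 ≤ end_) ∨ (start ≤ -1 ∧ end_ ≤ -1)) ∨
    pcAt start = n ∨ pcAt end_ = n ∨ ¬ (pcAt start < n ∧ n < pcAt end_))
instance (n : Int) (start : Int) (end_ : Int) : Decidable (Pre_getMaximumNumberofUniquePrimeFactors n start end_) := by unfold Pre_getMaximumNumberofUniquePrimeFactors; infer_instance

def pvWitness_getMaximumNumberofUniquePrimeFactors : Int × Int × Int := (2310, 0, 16)

def Spec_getMaximumNumberofUniquePrimeFactors (n : Int) (start : Int) (end_ : Int) (out : Int) : Prop := out = getMaximumNumberofUniquePrimeFactors_alt n start end_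
instance (n : Int) (start : Int) (end_ : Int) (out : Int) : Decidable (Spec_getMaximumNumberofUniquePrimeFactors n start end_ out) := by unfold Spec_getMaximumNumberofUniquePrimeFactors; infer_instance

-- ===== CLAIM (what is proved, stated in full; the proofs are below) =====
def Claim_equal_getMaximumNumberofUniquePrimeFactors : Prop := ∀ (n : Int) (start : Int) (end_ : Int), Dom_getMaximumNumberofUniquePrimeFactors n start end_ → Pre_getMaximumNumberofUniquePrimeFactors n start end_ → Spec_getMaximumNumberofUniquePrimeFactors n start end_ (getMaximumNumberofUniquePrimeFactors n start end_)

-- ===== LEMMAS AND PROOFS =====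

theorem pvGoA_succ (n : Int) (f : Nat) (s e : Int) :
    pvGoA n (f + 1) s e =
      (if pcAt s = n then s + 1
       else if pcAt e = n then e + 1
       else if pcAt s < n ∧ n < pcAt e then
         if e - s = 1 then s + 1
         else
           let left := pvGoA n f s (PySem.Int.floordiv (s + e + 1) 2)
           if left ≠ 0 then left else pvGoA n f (PySem.Int.floordiv (s + e + 1) 2) e
       else 0) := rfl

theorem pvScanB_succ (n : Int) (f : Nat) (i : Int) :
    pvScanB n (f + 1) i = (if pcAt (i + 1) < n then pvScanB n f (i + 1) else i) := rfl

-- adjacent entries of the wrapped table grow, except across the wrap point -1 → 0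
theorem pcStep (i : Int) (h1 : -17 ≤ i) (h2 : i ≤ 15) (h3 : i ≠ -1) :
    pcAt i < pcAt (i + 1) := by
  interval_cases i <;> first | (exact absurd rfl h3) | decide

theorem pcMonoAux : ∀ (d : Nat) (i j : Int), j - i = (d : Int) → -17 ≤ i → i < j →
    j ≤ 16 → (0 ≤ i ∨ j ≤ -1) → pcAt i < pcAt j := by
  intro d
  induction d with
  | zero => intro i j hd _ hij _ _; omega
  | succ d ih =>
    intro i j hd h1 hij h2 hb
    have hstep : pcAt i < pcAt (i + 1) := pcStep i h1 (by omega) (by omega)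
    by_cases hj : i + 1 = j
    · rwa [hj] at hstep
    · have := ih (i + 1) j (by omega) (by omega) (by omega) h2 (by omega)
      omega

theorem pcMono (i j : Int) (h1 : -17 ≤ i) (hij : i < j) (h2 : j ≤ 16)
    (hb : 0 ≤ i ∨ j ≤ -1) : pcAt i < pcAt j :=
  pcMonoAux (j - i).toNat i j (by omega) h1 hij h2 hb

-- B's scan lands exactly on the stated index j
theorem scanEq (n : Int) : ∀ (f : Nat) (i j : Int), i ≤ j → (j - i).toNat < f →
    (∀ k : Int, i ≤ k → k < j → pcAt (k + 1) < n) → ¬ pcAt (j + 1) < n →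
    pvScanB n f i = j := by
  intro f
  induction f with
  | zero => intro i j h1 h2 _ _; omega
  | succ f ih =>
    intro i j h1 h2 hall hstop
    by_cases hij : i = j
    · subst hij; rw [pvScanB_succ, if_neg hstop]
    · have hlt : pcAt (i + 1) < n := hall i le_rfl (by omega)
      rw [pvScanB_succ, if_pos hlt]
      exact ih (i + 1) j (by omega) (by omega) (fun k hk1 hk2 => hall k (by omega) hk2) hstop

theorem goAZero (n : Int) (f : Nat) (s e : Int) (h1 : pcAt s ≠ n) (h2 : pcAt e ≠ n)
    (h3 : ¬ (pcAt s < n ∧ n < pcAt e)) : pvGoA n f s e = 0 := by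
  cases f with
  | zero => rfl
  | succ f => rw [pvGoA_succ, if_neg h1, if_neg h2, if_neg h3]

theorem goAHit (n : Int) (f : Nat) (s e : Int) (hf : 1 ≤ f) (h1 : pcAt s ≠ n)
    (h2 : pcAt e = n) : pvGoA n f s e = e + 1 := by
  cases f with
  | zero => omega
  | succ f => rw [pvGoA_succ, if_neg h1, if_pos h2]

theorem midLt (s e : Int) (h : s + 1 < e) : PySem.Int.floordiv (s + e + 1) 2 < e := by
  have := (PySem.Int.floordiv_lt_iff_lt_mul (a := s + e + 1) (b := 2) (q := e) (by norm_num)).mpr (by omega)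
  omega

theorem ltMid (s e : Int) (h : s < e) : s < PySem.Int.floordiv (s + e + 1) 2 := by
  have := (PySem.Int.le_floordiv_iff_mul_le (a := s + e + 1) (b := 2) (q := s + 1) (by norm_num)).mpr (by omega)
  omega

-- the heart: on a bracketed same-sign-block interval, A's recursion returns the answer
-- determined by the last index j with pcAt j < n
theorem goAEq (n : Int) : ∀ (f : Nat) (s e j : Int),
    (e - s).toNat ≤ f → -17 ≤ s → s < e → e ≤ 16 → (0 ≤ s ∨ e ≤ -1) →
    pcAt s < n → n < pcAt e →
    s ≤ j → j < e → (∀ k : Int, s ≤ k → k ≤ j → pcAt k < n) → ¬ pcAt (j + 1) < n →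
    pvGoA n f s e = (if pcAt (j + 1) = n then j + 2 else j + 1) := by
  intro f
  induction f with
  | zero => intro s e j hf _ hse _ _ _ _ _ _ _ _; omega
  | succ f ih =>
    intro s e j hf hs hse he hb hsn hne hsj hje hall hstop
    have hne1 : pcAt s ≠ n := ne_of_lt hsn
    have hne2 : pcAt e ≠ n := (ne_of_lt hne).symm
    rw [pvGoA_succ, if_neg hne1, if_neg hne2, if_pos ⟨hsn, hne⟩]
    by_cases h1 : e - s = 1
    · rw [if_pos h1]
      have hjs : j = s := by omega
      have hpe : pcAt (j + 1) ≠ n := by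
        rw [show j + 1 = e by omega]; exact hne2
      rw [if_neg hpe]; omega
    · rw [if_neg h1]
      have hm1 : s < PySem.Int.floordiv (s + e + 1) 2 := ltMid s e hse
      have hm2 : PySem.Int.floordiv (s + e + 1) 2 < e := midLt s e (by omega)
      set m := PySem.Int.floordiv (s + e + 1) 2 with hm
      show (let left := pvGoA n f s m;
            if left ≠ 0 then left else pvGoA n f m e) = _
      simp only []
      rcases lt_trichotomy (pcAt m) n with hlt | heq | hgt
      · -- table value at the midpoint still below n: A's left half returns 0, recurse right
        have hmj : m ≤ j := by
          by_contra hc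
          push_neg at hc
          have hle : pcAt (j + 1) ≤ pcAt m := by
            rcases eq_or_lt_of_le (show j + 1 ≤ m by omega) with h' | h'
            · rw [h']
            · exact le_of_lt (pcMono (j + 1) m (by omega) h' (by omega) (by rcases hb with h | h <;> omega))
          omega
        have hleft : pvGoA n f s m = 0 :=
          goAZero n f s m hne1 (ne_of_lt hlt) (fun h => absurd h.2 (by omega))
        rw [hleft, if_neg (by simp)]
        exact ih m e j (by omega) (by omega) hm2 he
          (by rcases hb with h | h; exact Or.inl (by omega); exact Or.inr h) hlt hne hmj hje
          (fun k hk1 hk2 => hall k (by omega) hk2) hstop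
      · -- exact hit at the midpoint: left call returns m+1 via its endpoint check
        have hleft : pvGoA n f s m = m + 1 := goAHit n f s m (by omega) hne1 heq
        have hmne : m + 1 ≠ 0 := by rcases hb with h | h <;> omega
        rw [hleft, if_pos hmne]
        have hjm : j = m - 1 := by
          have h1' : j < m := by
            by_contra hc; push_neg at hc
            have := hall m (by omega) hc; omega
          have h2' : m - 1 ≤ j := by
            by_contra hc; push_neg at hc
            have := pcMono (j + 1) m (by omega) (by omega) (by omega)
              (by rcases hb with h | h <;> omega)
            omega
          omega
        have : pcAt (j + 1) = n := by rw [show j + 1 = m by omega]; exact heq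
        rw [if_pos this]; omega
      · -- midpoint already above n: recurse into the left half
        have hjm : j < m := by
          by_contra hc; push_neg at hc
          have := hall m (by omega) hc; omega
        have hleft : pvGoA n f s m = (if pcAt (j + 1) = n then j + 2 else j + 1) :=
          ih s m j (by omega) hs hm1 (by omega)
            (by rcases hb with h | h; exact Or.inl h; exact Or.inr (by omega)) hsn hgt hsj hjm
            hall hstop
        rw [hleft]
        by_cases hz : (if pcAt (j + 1) = n then j + 2 else j + 1) = 0
        · rw [if_neg (by simpa using hz), goAZero n f m e (ne_of_gt hgt) hne2
            (fun h => absurd h.1 (by omega))]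
          omega
        · rw [if_pos hz]

-- the bracketing index j exists whenever n is strictly between the endpoint entries
theorem existsJ (n : Int) : ∀ (d : Nat) (s e : Int), e - s = (d : Int) → s < e →
    pcAt s < n → n < pcAt e →
    ∃ j : Int, s ≤ j ∧ j < e ∧ (∀ k : Int, s ≤ k → k ≤ j → pcAt k < n) ∧ ¬ pcAt (j + 1) < n := by
  intro d
  induction d with
  | zero => intro s e hd hse _ _; omega
  | succ d ih =>
    intro s e hd hse hs he
    by_cases h : pcAt (s + 1) < n
    · have hse1 : s + 1 < e := by
        by_contra hc
        have he1 : e = s + 1 := by omega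
        rw [he1] at he; omega
      obtain ⟨j, hj1, hj2, hj3, hj4⟩ := ih (s + 1) e (by omega) hse1 h he
      refine ⟨j, by omega, hj2, fun k hk1 hk2 => ?_, hj4⟩
      rcases eq_or_lt_of_le hk1 with h' | h'
      · rw [← h']; exact hs
      · exact hj3 k (by omega) hk2
    · exact ⟨s, le_rfl, hse, fun k hk1 hk2 => by rw [show k = s by omega]; exact hs, h⟩

-- ===== VERDICT (by name: the statement is the Claim_ definition above) =====
theorem getMaximumNumberofUniquePrimeFactors_spec : Claim_equal_getMaximumNumberofUniquePrimeFactors := by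
  intro n s e _hdom hpre
  obtain ⟨hs1, hs2, he1, he2, hrest⟩ := hpre
  unfold Spec_getMaximumNumberofUniquePrimeFactors
  unfold getMaximumNumberofUniquePrimeFactors getMaximumNumberofUniquePrimeFactors_alt
  by_cases h1 : pcAt s = n
  · rw [if_pos h1, show (64 : Nat) = 63 + 1 from rfl, pvGoA_succ, if_pos h1]
  · rw [if_neg h1]
    by_cases h2 : pcAt e = n
    · rw [if_pos h2, goAHit n 64 s e (by omega) h1 h2]
    · rw [if_neg h2]
      by_cases h3 : pcAt s < n ∧ n < pcAt e
      · rw [if_neg (by simpa using h3)]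
        have hb : (0 ≤ s ∧ 0 ≤ e) ∨ (s ≤ -1 ∧ e ≤ -1) := by
          rcases hrest with hb | hq | hq | hq
          · exact hb
          · exact absurd hq h1
          · exact absurd hq h2
          · exact absurd h3 hq
        have hse : s < e := by
          rcases lt_trichotomy s e with h | h | h
          · exact h
          · rw [h] at h3; omega
          · have := pcMono e s (by omega) h (by omega) (by rcases hb with hh | hh; exact Or.inl hh.2; exact Or.inr hh.1)
            omega
        obtain ⟨j, hj1, hj2, hj3, hj4⟩ := existsJ n (e - s).toNat s e (by omega) hse h3.1 h3.2
        have hblock : 0 ≤ s ∨ e ≤ -1 := by rcases hb with hh | hh; exact Or.inl hh.1; exact Or.inr hh.2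
        have hA : pvGoA n 64 s e = (if pcAt (j + 1) = n then j + 2 else j + 1) :=
          goAEq n 64 s e j (by omega) hs1 hse he2 hblock h3.1 h3.2 hj1 hj2 hj3 hj4
        have hscan : pvScanB n 64 s = j :=
          scanEq n 64 s j hj1 (by omega)
            (fun k hk1 hk2 => hj3 (k + 1) (by omega) (by omega)) hj4
        rw [hA]
        show _ = (let i := pvScanB n 64 s; if pcAt (i + 1) = n then i + 2 else i + 1)
        simp only [hscan]
      · rw [if_pos (by simpa using h3), goAZero n 64 s e h1 h2 h3]
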